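-- pv_equiv track=rewrite | github.com/Fincarson/NTHU_Online_Judge | Python/14722_Slicing_Grid/Solution_1.py | solve
-- ===== SOURCE A (Python) =====
-- def solve(n, d, grid):
--     ans = ""
--     diagonal_grid = [[] for _ in range(2 * n - 1)]
--     for i in range (n):
--         for j in range (n):
--             diagonal_grid[i+j].append(grid[i][j])
--
--     for i in range (2 * n - 1):
--         if(d == 1):
--             ans += "".join(diagonal_grid[i][::-1])
--             d = 0
--         else:
--             ans += "".join(diagonal_grid[i][0:])
--             d = 1
--     return ans
-- ===== SOURCE B (Python) =====
-- def solve(n, d, grid):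
--     parts = []
--     for s in range(2 * n - 1):
--         cells = [grid[i][s - i] for i in range(max(0, s - n + 1), min(n - 1, s) + 1)]
--         if (s % 2 == 0) == (d == 1):
--             cells.reverse()
--         parts.append("".join(cells))
--     return "".join(parts)
-- ===== Notes on version B (the rewrite author's own statement) =====
-- stated objective: simpler
-- what changed: Drops the bucket table and the mutating d toggle: a single diagonal traversal computes each anti-diagonal directly by index arithmetic and reverses it when its parity matches the initial d.
import Mathlib
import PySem

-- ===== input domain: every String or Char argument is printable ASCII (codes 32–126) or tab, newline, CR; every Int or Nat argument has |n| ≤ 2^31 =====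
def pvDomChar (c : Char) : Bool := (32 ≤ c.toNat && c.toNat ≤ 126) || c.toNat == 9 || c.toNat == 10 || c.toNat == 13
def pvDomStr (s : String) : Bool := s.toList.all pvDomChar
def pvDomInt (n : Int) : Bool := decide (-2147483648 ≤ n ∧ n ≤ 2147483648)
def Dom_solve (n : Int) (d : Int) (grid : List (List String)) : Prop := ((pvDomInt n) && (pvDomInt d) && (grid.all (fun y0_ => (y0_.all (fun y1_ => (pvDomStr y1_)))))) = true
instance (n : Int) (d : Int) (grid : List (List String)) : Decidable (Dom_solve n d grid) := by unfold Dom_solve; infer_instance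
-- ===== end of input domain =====

-- B drops A's bucket table and mutating d toggle for a direct per-diagonal traversal (same values on Pre_).

-- ===== PORT A =====
def solve (n : Int) (d : Int) (grid : List (List String)) : String :=
  -- diagonal_grid = [[] for _ in range(2*n-1)]
  let dg0 : List (List String) :=
    (PySem.List.pyRange 0 (2 * n - 1) 1).map (fun _ => ([] : List String))
  -- nested loop: diagonal_grid[i+j].append(grid[i][j])  (indexing via getD/setD, exact under Pre_)
  let dg : List (List String) :=
    (PySem.List.pyRange 0 n 1).foldl (fun dg i =>
      (PySem.List.pyRange 0 n 1).foldl (fun dg j =>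
        PySem.List.pySetD dg (i + j)
          (PySem.List.pyGetD dg (i + j) [] ++
            [PySem.List.pyGetD (PySem.List.pyGetD grid i []) j ""])) dg) dg0
  -- second loop threading the (ans, d) state
  let st : String × Int :=
    (PySem.List.pyRange 0 (2 * n - 1) 1).foldl (fun st i =>
      if st.2 == 1 then
        (st.1 ++ PySem.Str.join ""
          ((PySem.List.slice? (PySem.List.pyGetD dg i []) none none (-1)).getD []), 0)
      else
        (st.1 ++ PySem.Str.join ""
          (PySem.List.slice (PySem.List.pyGetD dg i []) (some 0) none), 1)) ("", d)
  st.1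

-- ===== PORT B =====
def solve_alt (n : Int) (d : Int) (grid : List (List String)) : String :=
  PySem.Str.join ""
    ((PySem.List.pyRange 0 (2 * n - 1) 1).map (fun s =>
      let cells : List String :=
        (PySem.List.pyRange (max 0 (s - n + 1)) (min (n - 1) s + 1) 1).map (fun i =>
          PySem.List.pyGetD (PySem.List.pyGetD grid i []) (s - i) "")
      PySem.Str.join ""
        (if (PySem.Int.mod s 2 == 0) == (d == 1) then cells.reverse else cells)))

-- ===== PRECONDITION & SPEC =====
-- Pre_ excludes exactly the inputs where A raises IndexError: a grid with fewer than n rows,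
-- or one of its first n rows shorter than n.
def Pre_solve (n : Int) (d : Int) (grid : List (List String)) : Prop :=
  n ≤ (grid.length : Int) ∧ ∀ r ∈ grid.take n.toNat, n ≤ (r.length : Int)
instance (n : Int) (d : Int) (grid : List (List String)) : Decidable (Pre_solve n d grid) := by
  unfold Pre_solve; infer_instance
def pvWitness_solve : Int × Int × List (List String) := (2, 1, [["a", "b"], ["c", "d"]])

def Spec_solve (n : Int) (d : Int) (grid : List (List String)) (out : String) : Prop :=
  out = solve_alt n d grid
instance (n : Int) (d : Int) (grid : List (List String)) (out : String) :
    Decidable (Spec_solve n d grid out) := by unfold Spec_solve; infer_instance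

-- ===== CLAIM (what is proved, stated in full; the proofs are below) =====
def Claim_equal_solve : Prop := ∀ (n : Int) (d : Int) (grid : List (List String)),
  Dom_solve n d grid → Pre_solve n d grid → Spec_solve n d grid (solve n d grid)

-- ===== LEMMAS AND PROOFS =====

theorem join_empty_flatten (ps : List (List Char)) :
    PySem.Chars.join [] ps = ps.flatten := by
  induction ps with
  | nil => simp [PySem.Chars.join_nil]
  | cons p rest ih =>
    cases rest with
    | nil => simp [PySem.Chars.join_singleton]
    | cons q r => simp [PySem.Chars.join_cons_cons] at ih ⊢; simp [ih]

theorem sjoin_append (l : List String) (p : String) :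
    PySem.Str.join "" (l ++ [p]) = PySem.Str.join "" l ++ p := by
  apply String.toList_inj.mp
  simp [PySem.Str.toList_join, join_empty_flatten]

theorem sjoin_nil : PySem.Str.join "" ([] : List String) = "" := by
  apply String.toList_inj.mp
  simp [PySem.Str.toList_join, PySem.Chars.join_nil]

-- pointwise effect of the inner (row) loop of A
theorem inner_loop (m i s : Nat) (f : Nat → String) (dg : List (List String)) :
    (((List.range m).foldl (fun dg j =>
        dg.set (i + j) (dg.getD (i + j) [] ++ [f j])) dg).getD s [])
      = dg.getD s [] ++
        (if i ≤ s ∧ s < i + m ∧ s < dg.length then [f (s - i)] else []) ∧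
    ((List.range m).foldl (fun dg j =>
        dg.set (i + j) (dg.getD (i + j) [] ++ [f j])) dg).length = dg.length := by
  induction m with
  | zero => exact ⟨by rw [if_neg (by omega)]; simp, rfl⟩
  | succ m ih =>
    obtain ⟨ih1, ih2⟩ := ih
    rw [List.range_succ, List.foldl_append]
    simp only [List.foldl_cons, List.foldl_nil]
    constructor
    · rw [List.getD_eq_getElem?_getD, List.getElem?_set, ih2]
      by_cases hs : i + m = s
      · subst hs
        rw [if_pos rfl]
        by_cases hlen : i + m < dg.length
        · rw [if_pos hlen, Option.getD_some, ih1, if_neg (by omega), if_pos (by omega)]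
          simp
        · rw [if_neg hlen, if_neg (by omega)]
          rw [List.getD_eq_getElem?_getD, List.getElem?_eq_none (show dg.length ≤ i + m by omega)]
          simp
      · rw [if_neg hs, ← List.getD_eq_getElem?_getD, ih1]
        by_cases w : i ≤ s ∧ s < i + m ∧ s < dg.length
        · rw [if_pos w, if_pos (by omega)]
        · rw [if_neg w, if_neg (by omega)]
    · rw [List.length_set]; exact ih2

-- pointwise effect of A's whole bucket-filling double loop
theorem outer_loop (N : Nat) (g : Nat → Nat → String) (m s : Nat) (dg : List (List String)) :
    (((List.range m).foldl (fun dg i =>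
        (List.range N).foldl (fun dg j =>
          dg.set (i + j) (dg.getD (i + j) [] ++ [g i j])) dg) dg).getD s [])
      = dg.getD s [] ++
        (((List.range m).filter (fun i => decide (i ≤ s ∧ s < i + N ∧ s < dg.length))).map
          (fun i => g i (s - i))) ∧
    (((List.range m).foldl (fun dg i =>
        (List.range N).foldl (fun dg j =>
          dg.set (i + j) (dg.getD (i + j) [] ++ [g i j])) dg) dg).length = dg.length) := by
  induction m with
  | zero => simp
  | succ m ih =>
    obtain ⟨ih1, ih2⟩ := ih
    rw [List.range_succ, List.foldl_append]
    simp only [List.foldl_cons, List.foldl_nil]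
    obtain ⟨st1, st2⟩ := inner_loop N m s (g m) _
    constructor
    · rw [st1, ih1, ih2, List.filter_append, List.map_append, List.append_assoc]
      congr 1
      by_cases w : m ≤ s ∧ s < m + N ∧ s < dg.length
      · rw [if_pos w]; simp [w]
      · rw [if_neg w]
        simp only [List.filter_cons, List.filter_nil]
        rw [decide_eq_false w]
        simp
    · rw [st2, ih2]

def dAfter (d0 : Int) (m : Nat) : Int :=
  if m = 0 then d0 else if (m % 2 == 0) == (d0 == 1) then 1 else 0

theorem dAfter_beq (d0 : Int) (m : Nat) :
    (dAfter d0 m == 1) = ((m % 2 == 0) == (d0 == 1)) := by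
  rcases m with _ | m
  · simp [dAfter]
  · simp only [dAfter, if_neg (Nat.succ_ne_zero m)]
    by_cases c : ((m + 1) % 2 == 0) = (d0 == 1)
    · rw [if_pos (by rw [c]; exact beq_self_eq_true _), c]
      simp
    · rw [if_neg (by simpa using c)]
      cases h : (m + 1) % 2 == 0 <;> cases h2 : d0 == 1 <;> simp_all

theorem dAfter_succ (d0 : Int) (m : Nat) :
    dAfter d0 (m + 1) = if dAfter d0 m == 1 then 0 else 1 := by
  rw [dAfter_beq]
  rcases Nat.mod_two_eq_zero_or_one m with h | h <;>
    cases h2 : d0 == 1 <;>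
      simp [dAfter, Nat.succ_mod_two_eq_zero_iff, h, h2]

-- A's second loop (with its mutating d) produces B's parity-selected concatenation
theorem phase2 (C : Nat → List String) (d0 : Int) (m : Nat) :
    ((List.range m).foldl (fun (st : String × Int) s =>
        if st.2 == 1 then (st.1 ++ PySem.Str.join "" (C s).reverse, 0)
        else (st.1 ++ PySem.Str.join "" (C s), 1)) ("", d0))
    = (PySem.Str.join "" ((List.range m).map (fun s =>
         PySem.Str.join "" (if (s % 2 == 0) == (d0 == 1) then (C s).reverse else C s))),
       dAfter d0 m) := by
  induction m with
  | zero => simp [dAfter, sjoin_nil]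
  | succ m ih =>
    rw [List.range_succ, List.foldl_append, ih]
    simp only [List.foldl_cons, List.foldl_nil]
    rw [List.map_append, List.map_cons, List.map_nil, sjoin_append, dAfter_succ]
    cases c : dAfter d0 m == 1
    · have c' : ((m % 2 == 0) == (d0 == 1)) = false := by rw [← dAfter_beq, c]
      rw [c']
      simp
    · have c' : ((m % 2 == 0) == (d0 == 1)) = true := by rw [← dAfter_beq, c]
      rw [c']
      simp

theorem filter_range_interval (lo hi : Nat) (p : Nat → Bool) :
    ∀ N, (∀ i, i < N → p i = decide (lo ≤ i ∧ i < hi)) →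
      (List.range N).filter p = (List.range (min hi N - lo)).map (fun k => lo + k) := by
  intro N
  induction N with
  | zero => simp
  | succ N ih =>
    intro hp
    rw [List.range_succ, List.filter_append, ih (fun i h => hp i (by omega))]
    simp only [List.filter_cons, List.filter_nil]
    rw [hp N (by omega)]
    by_cases w : lo ≤ N ∧ N < hi
    · rw [decide_eq_true w]
      have h1 : min hi N = N := by omega
      have h2 : min hi (N + 1) = N + 1 := by omega
      rw [h1, h2, show N + 1 - lo = (N - lo) + 1 by omega, List.range_succ, List.map_append]
      simp
      omega
    · rw [decide_eq_false w]
      have h3 : min hi (N + 1) - lo = min hi N - lo := by omega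
      simp [h3]

theorem getD_map_const {α : Type} (l : List α) (s : Nat) :
    (l.map (fun _ => ([] : List String))).getD s [] = [] := by
  rw [List.getD_eq_getElem?_getD, List.getElem?_map]
  cases l[s]? <;> simp

theorem mod_cast_two (s : Nat) : PySem.Int.mod (s : Int) 2 = ((s % 2 : Nat) : Int) := by
  simp [PySem.Int.mod, Int.fmod_eq_emod]

theorem beq_cast_zero (k : Nat) : (((k : Int)) == 0) = (k == 0) := by
  cases h : k == 0 <;> simp_all

-- ===== VERDICT (by name: the statement is the Claim_ definition above) =====
theorem solve_spec : Claim_equal_solve := by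
  intro n d grid _ _
  unfold Spec_solve
  simp only [solve, solve_alt]
  by_cases hn : n ≤ 0
  · rw [PySem.List.pyRange_one_eq_nil (by omega : 2 * n - 1 ≤ 0)]
    simp [sjoin_nil]
  · replace hn : 0 < n := by omega
    have hn' : n = (n.toNat : Int) := by omega
    set N := n.toNat with hNdef
    have hN1 : 1 ≤ N := by omega
    have hL : (2 * n - 1) = ((2 * N - 1 : Nat) : Int) := by omega
    rw [hL, hn']
    simp only [PySem.List.pyRange_zero_nat, List.foldl_map, List.map_map]
    simp only [← Nat.cast_add, PySem.List.pySetD_natCast, PySem.List.pyGetD_natCast,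
      PySem.List.slice_zero_start, PySem.List.slice_none_none,
      PySem.List.slice?_none_none_neg_one, Option.getD_some]
    rw [phase2]
    dsimp only
    congr 1
    apply List.map_congr_left
    intro s hs
    rw [List.mem_range] at hs
    simp only [Function.comp_def]
    rw [mod_cast_two, beq_cast_zero]
    obtain ⟨h1, -⟩ := outer_loop N (fun i j => (grid.getD i []).getD j "") N s
      ((List.range (2 * N - 1)).map (fun _ => ([] : List String)))
    rw [h1, getD_map_const]
    rw [filter_range_interval (s + 1 - N) (min (s + 1) N) _ N
      (by intro i hi_
          simp only [List.length_map, List.length_range, decide_eq_decide]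
          omega)]
    rw [show min (min (s + 1) N) N = min (s + 1) N by omega]
    rw [show max 0 ((s : Int) - (N : Int) + 1) = ((s + 1 - N : Nat) : Int) by omega]
    rw [show min ((N : Int) - 1) (s : Int) + 1 = ((min (s + 1) N : Nat) : Int) by omega]
    rw [PySem.List.pyRange_one]
    rw [show (((min (s + 1) N : Nat) : Int) - ((s + 1 - N : Nat) : Int)).toNat
          = min (s + 1) N - (s + 1 - N) by omega]
    simp only [List.map_map]
    have hmaps : ∀ k ∈ List.range (min (s + 1) N - (s + 1 - N)),
        ((fun i => (grid.getD i []).getD (s - i) "") ∘ fun k => s + 1 - N + k) k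
          = ((fun i => PySem.List.pyGetD (PySem.List.pyGetD grid i []) ((s : Int) - i) "") ∘
              fun k => ((s + 1 - N : Nat) : Int) + (k : Int)) k := by
      intro k hk
      rw [List.mem_range] at hk
      simp only [Function.comp_apply]
      rw [← Nat.cast_add, PySem.List.pyGetD_natCast,
        show ((s : Int) - ((s + 1 - N + k : Nat) : Int)) = ((s - (s + 1 - N + k) : Nat) : Int) by omega,
        PySem.List.pyGetD_natCast]
    rw [List.map_congr_left hmaps]
    simp only [List.nil_append, Function.comp_def]
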